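-- pv_equiv track=rewrite | github.com/flashTianjiao/oj | leetcode/onebit_and_twobit.py | isOneBit
-- ===== SOURCE A (Python) =====
-- def isOneBit(bits):
--     i = 0
--     while i < len(bits) - 1:
--         if bits[i] == 1:
--             i += 2
--         else:
--             i += 1
--     if i == len(bits) - 1:
--         return True
--     else:
--         return False
-- ===== SOURCE B (Python) =====
-- def isOneBit(bits):
--     if not bits:
--         return False
--     cnt = 0
--     i = len(bits) - 2
--     while i >= 0 and bits[i] == 1:
--         cnt += 1
--         i -= 1
--     return cnt % 2 == 0
-- ===== Notes on version B (the rewrite author's own statement) =====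
-- stated objective: faster
-- what changed: Replaced the forward greedy parse over the whole array with a backward scan that counts the run of consecutive 1s just before the last element and returns True iff that count is even, touching only the tail instead of the whole array.
import Mathlib
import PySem

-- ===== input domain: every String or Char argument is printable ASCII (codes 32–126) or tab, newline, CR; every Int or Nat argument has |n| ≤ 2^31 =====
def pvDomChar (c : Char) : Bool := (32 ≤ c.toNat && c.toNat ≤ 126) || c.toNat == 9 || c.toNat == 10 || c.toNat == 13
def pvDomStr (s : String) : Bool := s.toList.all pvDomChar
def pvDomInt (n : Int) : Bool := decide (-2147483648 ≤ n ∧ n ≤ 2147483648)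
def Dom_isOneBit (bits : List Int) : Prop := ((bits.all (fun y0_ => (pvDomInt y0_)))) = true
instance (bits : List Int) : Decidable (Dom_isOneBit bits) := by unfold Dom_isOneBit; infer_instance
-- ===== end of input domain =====

-- B changes the algorithm: instead of A's forward greedy parse, B checks the parity of the
-- run of consecutive 1s immediately before the last element (alternative, same asymptotic cost).

-- ===== PORT A =====
-- A's while loop: i advances by 2 on a 1-bit, by 1 otherwise, while i < len(bits) - 1.
-- bits[i] is always in range inside the loop (0 ≤ i < len - 1), so pyGetD is exact here.
def isOneBitLoop (bits : List Int) (i : Int) : Int :=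
  if _h : i < (bits.length : Int) - 1 then
    if PySem.List.pyGetD bits i 0 = 1 then isOneBitLoop bits (i + 2)
    else isOneBitLoop bits (i + 1)
  else i
termination_by ((bits.length : Int) - 1 - i).toNat
decreasing_by all_goals omega

def isOneBit (bits : List Int) : Bool :=
  if isOneBitLoop bits 0 = (bits.length : Int) - 1 then true else false

-- ===== PORT B =====
-- B's backward scan from index len-2 counting consecutive 1s = counting the leading 1s of
-- the reversed list without its last element.
def cntOnes : List Int → Nat
  | [] => 0
  | x :: xs => if x = 1 then 1 + cntOnes xs else 0

def isOneBit_alt (bits : List Int) : Bool :=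
  if bits.isEmpty then false
  else decide (cntOnes bits.dropLast.reverse % 2 = 0)

-- ===== PRECONDITION & SPEC =====
def Spec_isOneBit (bits : List Int) (out : Bool) : Prop := out = isOneBit_alt bits
instance (bits : List Int) (out : Bool) : Decidable (Spec_isOneBit bits out) := by unfold Spec_isOneBit; infer_instance

-- ===== CLAIM (what is proved, stated in full; the proofs are below) =====
def Claim_equal_isOneBit : Prop := ∀ (bits : List Int), Dom_isOneBit bits → Spec_isOneBit bits (isOneBit bits)

-- ===== LEMMAS AND PROOFS =====

-- shifting the loop index down one step corresponds to dropping the head of the list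
theorem isOneBitLoop_shift (x : Int) (l : List Int) (i : Int) (hi : 0 ≤ i) :
    isOneBitLoop (x :: l) (i + 1) = 1 + isOneBitLoop l i := by
  by_cases h : i < (l.length : Int) - 1
  · have hget : PySem.List.pyGetD (x :: l) (i + 1) 0 = PySem.List.pyGetD l i 0 := by
      rw [PySem.List.pyGetD_eq_getElem (x :: l) 0 (by omega)
            (by simp only [List.length_cons]; push_cast; omega),
          PySem.List.pyGetD_eq_getElem l 0 hi (by omega)]
      have : (i + 1).toNat = i.toNat + 1 := by omega
      simp [this]
    conv_lhs => rw [isOneBitLoop]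
    conv_rhs => rw [isOneBitLoop]
    rw [dif_pos (by simp only [List.length_cons]; push_cast; omega), dif_pos h, hget]
    split
    · have := isOneBitLoop_shift x l (i + 2) (by omega)
      rw [show i + 1 + 2 = i + 2 + 1 by ring, this]
    · have := isOneBitLoop_shift x l (i + 1) (by omega)
      rw [show i + 1 + 1 = (i + 1) + 1 by ring, this]
  · conv_lhs => rw [isOneBitLoop]
    conv_rhs => rw [isOneBitLoop]
    rw [dif_neg (by simp only [List.length_cons]; push_cast; omega), dif_neg h]
    omega
termination_by ((l.length : Int) - i).toNat
decreasing_by all_goals omega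

theorem cntOnes_append_ne (ys : List Int) (x : Int) (hx : x ≠ 1) :
    cntOnes (ys ++ [x]) = cntOnes ys := by
  induction ys with
  | nil => simp [cntOnes, hx]
  | cons y ys ih => by_cases hy : y = 1 <;> simp [cntOnes, hy, ih]

theorem cntOnes_append_pair_parity (ys : List Int) (x : Int) :
    cntOnes (ys ++ [x, 1]) % 2 = cntOnes ys % 2 := by
  induction ys with
  | nil =>
    by_cases hx : x = 1 <;> simp [cntOnes, hx]
  | cons y ys ih =>
    by_cases hy : y = 1
    · simp only [List.cons_append, cntOnes, if_pos hy]
      omega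
    · simp [cntOnes, hy]

theorem isOneBit_eq_alt : ∀ l : List Int, isOneBit l = isOneBit_alt l
  | [] => by
    rw [isOneBit, isOneBitLoop]
    norm_num [isOneBit_alt]
  | [x] => by
    rw [isOneBit, isOneBitLoop]
    norm_num [isOneBit_alt, cntOnes]
  | x :: y :: rest => by
    have hy1 : isOneBitLoop (y :: rest) 1 = 1 + isOneBitLoop rest 0 := by
      simpa using isOneBitLoop_shift y rest 0 le_rfl
    have hx1 : isOneBitLoop (x :: y :: rest) 1 = 1 + isOneBitLoop (y :: rest) 0 := by
      simpa using isOneBitLoop_shift x (y :: rest) 0 le_rfl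
    have hx2 : isOneBitLoop (x :: y :: rest) 2 = 1 + isOneBitLoop (y :: rest) 1 := by
      simpa using isOneBitLoop_shift x (y :: rest) 1 (by omega)
    have hstep : isOneBitLoop (x :: y :: rest) 0 =
        if x = 1 then 2 + isOneBitLoop rest 0 else 1 + isOneBitLoop (y :: rest) 0 := by
      conv_lhs => rw [isOneBitLoop]
      rw [dif_pos (by push_cast [List.length_cons]; omega),
          PySem.List.pyGetD_zero_cons]
      split
      · rw [show (0 : Int) + 2 = 2 by ring, hx2, hy1]; ring
      · rw [show (0 : Int) + 1 = 1 by ring, hx1]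
    by_cases hx : x = 1
    · -- A(1::y::rest) = A(rest); B side: parity unchanged by appending [y,1] to the reversed prefix
      have ihr := isOneBit_eq_alt rest
      have ha : isOneBit (x :: y :: rest) = isOneBit rest := by
        simp only [isOneBit, hstep, if_pos hx, List.length_cons]
        push_cast
        by_cases h : isOneBitLoop rest 0 = (rest.length : Int) - 1
        · rw [if_pos (by omega), if_pos (by omega)]
        · rw [if_neg (by omega), if_neg (by omega)]
      cases rest with
      | nil =>
        rw [ha, ihr]
        subst hx; simp [isOneBit_alt, cntOnes]
      | cons z rest' =>
        rw [ha, ihr]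
        simp only [isOneBit_alt, List.isEmpty_cons, Bool.false_eq_true, if_false]
        have hdrop : (x :: y :: z :: rest').dropLast.reverse
            = (z :: rest').dropLast.reverse ++ [y, x] := by
          simp [List.dropLast]
        rw [hdrop, hx, cntOnes_append_pair_parity]
    · -- A(x::y::rest) = A(y::rest); B side: appending a non-1 does not change the count
      have ihr := isOneBit_eq_alt (y :: rest)
      have ha : isOneBit (x :: y :: rest) = isOneBit (y :: rest) := by
        simp only [isOneBit, hstep, if_neg hx, List.length_cons]
        push_cast
        by_cases h : isOneBitLoop (y :: rest) 0 = (rest.length : Int)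
        · rw [if_pos (by omega), if_pos (by omega)]
        · rw [if_neg (by omega), if_neg (by omega)]
      rw [ha, ihr]
      simp only [isOneBit_alt, List.isEmpty_cons, Bool.false_eq_true, if_false]
      have hdrop : (x :: y :: rest).dropLast.reverse
          = (y :: rest).dropLast.reverse ++ [x] := by
        simp [List.dropLast]
      rw [hdrop, cntOnes_append_ne _ x hx]
termination_by l => l.length

-- ===== VERDICT (by name: the statement is the Claim_ definition above) =====
theorem isOneBit_spec : Claim_equal_isOneBit := by
  intro bits _
  unfold Spec_isOneBit
  exact isOneBit_eq_alt bits
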